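-- pv_equiv track=rewrite | github.com/Mr-Monster-0248/Hangman | Text Files/functions.py | displayLetter
-- ===== SOURCE A (Python) =====
-- def displayLetter(word, letter):
--     toDisp = list()
--     for i in range(len(word)):
--         if(word[i] == letter):
--             toDisp.append(letter)
--         else:
--             toDisp.append("_")
--     return "".join(toDisp)
-- ===== SOURCE B (Python) =====
-- def displayLetter(word, letter):
--     table = str.maketrans({c: "_" for c in set(word) if c != letter})
--     return word.translate(table)
-- ===== Notes on version B (the rewrite author's own statement) =====
-- stated objective: idiomatic
-- what changed: Replaces the explicit per-index if/else append loop with a precomputed translation table over the word's distinct non-matching characters and a single str.translate pass.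
import Mathlib
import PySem

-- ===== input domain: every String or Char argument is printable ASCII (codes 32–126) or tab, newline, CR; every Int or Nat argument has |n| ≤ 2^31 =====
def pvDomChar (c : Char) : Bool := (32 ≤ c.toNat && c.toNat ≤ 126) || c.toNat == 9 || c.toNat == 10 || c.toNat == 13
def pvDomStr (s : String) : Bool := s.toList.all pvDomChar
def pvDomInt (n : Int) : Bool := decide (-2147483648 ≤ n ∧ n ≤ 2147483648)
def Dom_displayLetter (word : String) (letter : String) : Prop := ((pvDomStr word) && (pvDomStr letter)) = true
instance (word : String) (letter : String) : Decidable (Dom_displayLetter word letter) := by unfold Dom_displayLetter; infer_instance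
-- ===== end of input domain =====

-- B replaces A's per-index if/else append loop with a translation table built from the word's
-- distinct non-matching characters and one translate pass (idiomatic; same result on all inputs).


-- ===== PORT A =====
-- for i in range(len(word)): append letter if word[i] == letter else "_"; "".join
-- word[i] is always in range, so the total pyGetD (with an unused default) is exact here
def displayLetter (word : String) (letter : String) : String :=
  let toDisp : List String :=
    (PySem.List.pyRange 0 (PySem.Str.len word) 1).foldl
      (fun acc i =>
        if String.ofList [PySem.List.pyGetD word.toList i ' '] == letter
        then acc ++ [letter] else acc ++ ["_"])
      []
  PySem.Str.join "" toDisp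

-- ===== PORT B =====
-- table = str.maketrans({c: "_" for c in set(word) if c != letter}); word.translate(table)
-- the table's key set is modelled as a PySem.Set of chars; translate is the per-char substitution pass
def displayLetter_alt (word : String) (letter : String) : String :=
  let mask : PySem.Set Char :=
    PySem.Set.ofList (word.toList.filter (fun c => String.ofList [c] != letter))
  String.ofList (word.toList.map (fun c => if PySem.Set.contains mask c then '_' else c))

-- ===== PRECONDITION & SPEC =====
def Spec_displayLetter (word : String) (letter : String) (out : String) : Prop := out = displayLetter_alt word letter
instance (word : String) (letter : String) (out : String) : Decidable (Spec_displayLetter word letter out) := by unfold Spec_displayLetter; infer_instance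

-- ===== CLAIM (what is proved, stated in full; the proofs are below) =====
def Claim_equal_displayLetter : Prop := ∀ (word : String) (letter : String), Dom_displayLetter word letter → Spec_displayLetter word letter (displayLetter word letter)

-- ===== LEMMAS AND PROOFS =====

-- ===== VERDICT (by name: the statement is the Claim_ definition above) =====
theorem displayLetter_spec : Claim_equal_displayLetter := by
  intro word letter _
  unfold Spec_displayLetter displayLetter displayLetter_alt
  simp only [PySem.Str.len_eq]
  rw [PySem.List.foldl_pyRange_zero_pyGetD' word.toList ' '
        (fun acc c => if String.ofList [c] == letter then acc ++ [letter] else acc ++ ["_"]) []]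
  have hbody : (fun (acc : List String) c => if String.ofList [c] == letter then acc ++ [letter] else acc ++ ["_"])
      = fun acc c => acc ++ [if String.ofList [c] == letter then letter else "_"] := by
    funext acc c; split <;> rfl
  rw [hbody, PySem.List.foldl_append_singleton_eq_map]
  set cs := word.toList with hcs
  set h := fun c => if PySem.Set.contains (PySem.Set.ofList (cs.filter (fun c => String.ofList [c] != letter))) c then '_' else c with hh
  apply String.toList_injective
  rw [PySem.Str.toList_join]
  simp only [String.toList_ofList]
  have hpt : cs.map (String.toList ∘ fun c => if String.ofList [c] == letter then letter else "_")
      = (cs.map h).map (fun c => [c]) := by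
    rw [List.map_map]
    apply List.map_congr_left
    intro c hc
    simp only [Function.comp, hh]
    by_cases hb : String.ofList [c] = letter
    · have hcont : PySem.Set.contains (PySem.Set.ofList (cs.filter (fun c => String.ofList [c] != letter))) c = false := by
        rw [Bool.eq_false_iff]
        intro hct
        rw [PySem.Set.contains_iff, PySem.Set.mem_ofList, List.mem_filter] at hct
        simp [hb] at hct
      rw [if_pos (by simp [hb] : (String.ofList [c] == letter) = true), hcont]
      simp [← hb]
    · have hcont : PySem.Set.contains (PySem.Set.ofList (cs.filter (fun c => String.ofList [c] != letter))) c = true := by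
        rw [PySem.Set.contains_iff, PySem.Set.mem_ofList, List.mem_filter]
        simp [hb, hc]
      rw [if_neg (by simp [hb] : ¬ (String.ofList [c] == letter) = true), hcont]
      rfl
  rw [List.nil_append, List.map_map, hpt]
  simpa using PySem.Chars.join_nil_singletons (cs.map h)
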